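-- pv_equiv track=rewrite | github.com/Hooorace-S/UniME | models/Backbone/decoder.py | _compute_strides
-- ===== SOURCE A (Python) =====
-- def _compute_strides(
--     patch_shape: tuple[int, int, int], num_stages: int
-- ) -> list[tuple[int, int, int]]:
--     return [
--         (
--             2 if (patch_shape[0] // (2 ** stage)) % 2 == 0 else 1,
--             2 if (patch_shape[1] // (2 ** stage)) % 2 == 0 else 1,
--             2 if (patch_shape[2] // (2 ** stage)) % 2 == 0 else 1,
--         )
--         for stage in reversed(range(num_stages))
--     ]
-- ===== SOURCE B (Python) =====
-- def _compute_strides(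
--     patch_shape: tuple[int, int, int], num_stages: int
-- ) -> list[tuple[int, int, int]]:
--     d0, d1, d2 = patch_shape
--     strides = []
--     for _ in range(num_stages):
--         strides.append((2 if d0 % 2 == 0 else 1,
--                         2 if d1 % 2 == 0 else 1,
--                         2 if d2 % 2 == 0 else 1))
--         d0, d1, d2 = d0 // 2, d1 // 2, d2 // 2
--     strides.reverse()
--     return strides
-- ===== Notes on version B (the rewrite author's own statement) =====
-- stated objective: faster
-- what changed: Replaces the comprehension that recomputes patch_shape[i] // 2**stage for every stage (walked in reverse) with a forward loop that maintains a running shape halved once per stage, reversing the accumulated list at the end.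
import Mathlib
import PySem

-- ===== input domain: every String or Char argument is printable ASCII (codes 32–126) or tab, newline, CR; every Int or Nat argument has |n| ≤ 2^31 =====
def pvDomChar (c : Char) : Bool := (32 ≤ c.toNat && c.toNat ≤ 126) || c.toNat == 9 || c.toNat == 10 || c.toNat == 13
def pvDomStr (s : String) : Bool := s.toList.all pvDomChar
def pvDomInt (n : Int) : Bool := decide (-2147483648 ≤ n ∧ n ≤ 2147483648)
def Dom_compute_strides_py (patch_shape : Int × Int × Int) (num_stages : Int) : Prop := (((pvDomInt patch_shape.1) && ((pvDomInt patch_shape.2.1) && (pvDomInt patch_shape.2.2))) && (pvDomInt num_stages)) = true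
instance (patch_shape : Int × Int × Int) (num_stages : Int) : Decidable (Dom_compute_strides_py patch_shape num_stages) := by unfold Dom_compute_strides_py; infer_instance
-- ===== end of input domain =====

-- B replaces A's per-stage recomputation of patch_shape[i] // 2**stage (over reversed(range))
-- by a forward loop halving a running shape, reversed at the end (alternative decomposition).

-- ===== PORT A =====
-- '2 if (x // 2**stage) % 2 == 0 else 1'; stage comes from range(num_stages), so stage ≥ 0 and 2**stage = 2 ^ stage.toNat exactly
def pvStageA (x : Int) (stage : Int) : Int :=
  if PySem.Int.mod (PySem.Int.floordiv x (2 ^ stage.toNat)) 2 = 0 then 2 else 1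

def compute_strides_py (patch_shape : Int × Int × Int) (num_stages : Int) : List (Int × Int × Int) :=
  ((PySem.List.pyRange 0 num_stages 1).reverse).map (fun stage =>
    (pvStageA patch_shape.1 stage, pvStageA patch_shape.2.1 stage, pvStageA patch_shape.2.2 stage))

-- ===== PORT B =====
def pvStrideB (x : Int) : Int := if PySem.Int.mod x 2 = 0 then 2 else 1

-- the 'for _ in range(num_stages)' loop: fuel = num_stages.toNat (range is empty for num_stages ≤ 0)
def pvLoopB : Nat → Int → Int → Int → List (Int × Int × Int)
  | 0, _, _, _ => []
  | k + 1, d0, d1, d2 =>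
      (pvStrideB d0, pvStrideB d1, pvStrideB d2) ::
        pvLoopB k (PySem.Int.floordiv d0 2) (PySem.Int.floordiv d1 2) (PySem.Int.floordiv d2 2)

def compute_strides_py_alt (patch_shape : Int × Int × Int) (num_stages : Int) : List (Int × Int × Int) :=
  (pvLoopB num_stages.toNat patch_shape.1 patch_shape.2.1 patch_shape.2.2).reverse

-- ===== PRECONDITION & SPEC =====
def Spec_compute_strides_py (patch_shape : Int × Int × Int) (num_stages : Int) (out : List (Int × Int × Int)) : Prop := out = compute_strides_py_alt patch_shape num_stages
instance (patch_shape : Int × Int × Int) (num_stages : Int) (out : List (Int × Int × Int)) : Decidable (Spec_compute_strides_py patch_shape num_stages out) := by unfold Spec_compute_strides_py; infer_instance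

-- ===== CLAIM (what is proved, stated in full; the proofs are below) =====
def Claim_equal_compute_strides_py : Prop := ∀ (patch_shape : Int × Int × Int) (num_stages : Int), Dom_compute_strides_py patch_shape num_stages → Spec_compute_strides_py patch_shape num_stages (compute_strides_py patch_shape num_stages)

-- ===== LEMMAS AND PROOFS =====

-- floor-halving twice composes: (x // 2) // 2^i = x // 2^(i+1)
theorem pvFloordiv_halve (x : Int) (i : Nat) :
    PySem.Int.floordiv (PySem.Int.floordiv x 2) (2 ^ i) = PySem.Int.floordiv x (2 ^ (i + 1)) := by
  rw [PySem.Int.floordiv_eq_ediv_of_pos (b := 2) (by norm_num),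
      PySem.Int.floordiv_eq_ediv_of_pos (b := (2 : Int) ^ i) (by positivity),
      PySem.Int.floordiv_eq_ediv_of_pos (b := (2 : Int) ^ (i + 1)) (by positivity),
      Int.ediv_ediv_of_nonneg (by norm_num), ← pow_succ']

-- B's loop produces A's comprehension values in forward order
theorem pvLoopB_eq (k : Nat) (a b c : Int) :
    pvLoopB k a b c =
      (List.range k).map (fun i =>
        (pvStrideB (PySem.Int.floordiv a (2 ^ i)),
         pvStrideB (PySem.Int.floordiv b (2 ^ i)),
         pvStrideB (PySem.Int.floordiv c (2 ^ i)))) := by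
  induction k generalizing a b c with
  | zero => simp [pvLoopB]
  | succ k ih =>
      rw [List.range_succ_eq_map, pvLoopB, ih]
      simp only [List.map_cons, List.map_map, pow_zero]
      congr 1
      · simp [PySem.Int.floordiv]
      · apply List.map_congr_left
        intro i _
        simp only [Function.comp_apply, pvFloordiv_halve]

theorem pvStageA_eq (x : Int) (k : Nat) :
    pvStageA x ((k : Int)) = pvStrideB (PySem.Int.floordiv x (2 ^ k)) := by
  simp [pvStageA, pvStrideB]

-- ===== VERDICT (by name: the statement is the Claim_ definition above) =====
theorem compute_strides_py_spec : Claim_equal_compute_strides_py := by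
  intro ps n _
  unfold Spec_compute_strides_py compute_strides_py compute_strides_py_alt
  rw [pvLoopB_eq, PySem.List.pyRange_one, List.map_reverse, List.map_map]
  simp only [sub_zero]
  congr 1
  apply List.map_congr_left
  intro k _
  simp only [Function.comp_apply, zero_add, pvStageA_eq]
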